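-- pv_equiv track=rewrite | github.com/JustFurax/TIPElaby | TSI_GEN_FUSION.py | matcoefinitialisation
-- ===== SOURCE A (Python) =====
-- def matcoefinitialisation(largeur, hauteur):
--     """
--     Parameters
--     ----------
--     largeur : Entier
--         taille x du labyrinthe
--     hauteur : Entier
--         taille y du labyrinthe
--
--     Returns
--     -------
--     matrice_dupliquee : liste de liste
--         Donne la matrice des coefficient au debut de la fusion. Chaque case du labyrinthe a un coefficient different
--     """
--
--     matrice=[]
--     l=1
--
--     for p in range(hauteur):
--
--         sousmatrice=[]
--
--         for n in range (largeur):
--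
--             sousmatrice.append(l)
--             l=l+1
--         matrice.append(sousmatrice)
--
--     matrice_dupliquee = []
--     for ligne in matrice:
--         ligne_dupliquee = []
--         for caractere in ligne:
--             ligne_dupliquee.append(caractere)
--         matrice_dupliquee.append(ligne_dupliquee)
--
--     return matrice_dupliquee
-- ===== SOURCE B (Python) =====
-- def matcoefinitialisation(largeur, hauteur):
--     # Same matrix, but each cell is computed directly from its coordinates
--     # (closed form p*largeur + n + 1) instead of threading a running counter;
--     # rows are fresh lists, so no deep-copy pass is needed.
--     return [[p * largeur + n + 1 for n in range(largeur)] for p in range(hauteur)]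
-- ===== Notes on version B (the rewrite author's own statement) =====
-- stated objective: simpler
-- what changed: Replaces the stateful running counter threaded through two nested loops plus a second deep-copy pass with a direct closed-form computation of each cell from its coordinates (p*largeur + n + 1), eliminating both the accumulator state and the copy pass.
import Mathlib
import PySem

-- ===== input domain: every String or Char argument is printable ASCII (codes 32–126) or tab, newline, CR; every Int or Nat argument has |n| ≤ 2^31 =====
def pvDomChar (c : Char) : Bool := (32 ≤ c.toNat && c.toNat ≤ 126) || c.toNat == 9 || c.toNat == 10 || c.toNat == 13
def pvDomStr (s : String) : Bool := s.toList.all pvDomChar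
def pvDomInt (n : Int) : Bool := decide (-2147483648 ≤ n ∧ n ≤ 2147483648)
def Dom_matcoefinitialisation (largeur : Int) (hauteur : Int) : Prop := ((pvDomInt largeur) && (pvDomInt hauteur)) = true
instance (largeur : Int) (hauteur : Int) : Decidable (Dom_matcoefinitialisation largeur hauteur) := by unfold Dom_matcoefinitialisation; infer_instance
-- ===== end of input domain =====

-- B computes each cell directly from its coordinates (p*largeur + n + 1) instead of
-- threading a running counter through nested loops, and drops the deep-copy pass (simpler).

-- ===== PORT A =====
def matcoefinitialisation (largeur : Int) (hauteur : Int) : List (List Int) :=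
  -- matrice=[]; l=1; for p in range(hauteur): inner loop appends l and increments l
  let res := (PySem.List.pyRange 0 hauteur 1).foldl
    (fun s _p =>
      let inner := (PySem.List.pyRange 0 largeur 1).foldl
        (fun t _n => (t.1 ++ [t.2], t.2 + 1)) (([] : List Int), s.2)
      (s.1 ++ [inner.1], inner.2))
    (([] : List (List Int)), (1 : Int))
  -- second pass: matrice_dupliquee element-by-element copy
  res.1.foldl (fun acc ligne =>
    acc ++ [ligne.foldl (fun ld c => ld ++ [c]) ([] : List Int)]) ([] : List (List Int))

-- ===== PORT B =====
def matcoefinitialisation_alt (largeur : Int) (hauteur : Int) : List (List Int) :=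
  (PySem.List.pyRange 0 hauteur 1).map (fun p =>
    (PySem.List.pyRange 0 largeur 1).map (fun n => p * largeur + n + 1))

-- ===== PRECONDITION & SPEC =====
def Spec_matcoefinitialisation (largeur : Int) (hauteur : Int) (out : List (List Int)) : Prop := out = matcoefinitialisation_alt largeur hauteur
instance (largeur : Int) (hauteur : Int) (out : List (List Int)) : Decidable (Spec_matcoefinitialisation largeur hauteur out) := by unfold Spec_matcoefinitialisation; infer_instance

-- ===== CLAIM (what is proved, stated in full; the proofs are below) =====
def Claim_equal_matcoefinitialisation : Prop := ∀ (largeur : Int) (hauteur : Int), Dom_matcoefinitialisation largeur hauteur → Spec_matcoefinitialisation largeur hauteur (matcoefinitialisation largeur hauteur)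

-- ===== LEMMAS AND PROOFS =====

-- the element-by-element copy loops are the identity
theorem pv_copy_row (l acc : List Int) :
    l.foldl (fun ld c => ld ++ [c]) acc = acc ++ l := by
  induction l generalizing acc with
  | nil => simp
  | cons x t ih => rw [List.foldl_cons, ih]; simp

theorem pv_copy_mat (m acc : List (List Int)) :
    m.foldl (fun acc ligne =>
      acc ++ [ligne.foldl (fun ld c => ld ++ [c]) ([] : List Int)]) acc = acc ++ m := by
  induction m generalizing acc with
  | nil => simp
  | cons x t ih => rw [List.foldl_cons, ih, pv_copy_row]; simp

theorem pv_shift (l : Int) (n : Nat) :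
    (List.range (n+1)).map (fun k : Nat => l + (k : Int))
      = l :: (List.range n).map (fun k : Nat => (l + 1) + (k : Int)) := by
  rw [List.range_succ_eq_map, List.map_cons, List.map_map]
  refine congrArg₂ _ (by simp) ?_
  apply List.map_congr_left; intro k _
  simp only [Function.comp_apply]; push_cast; ring

-- inner loop: appends l, l+1, … and advances the counter by the row length
theorem pv_inner (L : List Int) (sm : List Int) (l : Int) :
    L.foldl (fun t _n => (t.1 ++ [t.2], t.2 + 1)) (sm, l)
      = (sm ++ (List.range L.length).map (fun k : Nat => l + (k : Int)), l + L.length) := by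
  induction L generalizing sm l with
  | nil => simp
  | cons x t ih =>
    rw [List.foldl_cons]
    simp only []
    rw [ih, List.length_cons, pv_shift]
    simp only [Prod.mk.injEq]
    constructor
    · simp
    · push_cast; ring

theorem pv_rows_shift (l : Int) (W : Nat) (n : Nat) :
    (List.range (n+1)).map (fun p : Nat => (List.range W).map (fun k : Nat => l + (p : Int) * (W : Int) + (k : Int)))
      = ((List.range W).map (fun k : Nat => l + (k : Int))) ::
        (List.range n).map (fun p : Nat => (List.range W).map (fun k : Nat => (l + (W : Int)) + (p : Int) * (W : Int) + (k : Int))) := by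
  rw [List.range_succ_eq_map, List.map_cons, List.map_map]
  refine congrArg₂ _ ?_ ?_
  · apply List.map_congr_left; intro k _; push_cast; ring
  · apply List.map_congr_left; intro p _
    simp only [Function.comp_apply]
    apply List.map_congr_left; intro k _
    push_cast; ring

-- outer loop: each row p begins at counter l + p * row-length
theorem pv_outer (H : List Int) (largeur : Int) (m : List (List Int)) (l : Int) :
    H.foldl
      (fun s _p =>
        let inner := (PySem.List.pyRange 0 largeur 1).foldl
          (fun t _n => (t.1 ++ [t.2], t.2 + 1)) (([] : List Int), s.2)
        (s.1 ++ [inner.1], inner.2)) (m, l)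
      = (m ++ (List.range H.length).map
            (fun p : Nat => (List.range (PySem.List.pyRange 0 largeur 1).length).map
              (fun k : Nat => l + (p : Int) * ((PySem.List.pyRange 0 largeur 1).length : Int) + (k : Int))),
         l + H.length * (PySem.List.pyRange 0 largeur 1).length) := by
  induction H generalizing m l with
  | nil => simp
  | cons x t ih =>
    simp only [List.foldl_cons]
    rw [pv_inner, List.nil_append, ih, List.length_cons, pv_rows_shift]
    simp only [Prod.mk.injEq]
    constructor
    · simp
    · push_cast; ring

-- ===== VERDICT (by name: the statement is the Claim_ definition above) =====
theorem matcoefinitialisation_spec : Claim_equal_matcoefinitialisation := by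
  intro largeur hauteur _
  show matcoefinitialisation largeur hauteur = matcoefinitialisation_alt largeur hauteur
  unfold matcoefinitialisation matcoefinitialisation_alt
  simp only [pv_outer, pv_copy_mat, List.nil_append]
  rw [PySem.List.pyRange_one 0 hauteur, PySem.List.pyRange_one 0 largeur]
  simp only [List.length_map, List.length_range, List.map_map]
  apply List.map_congr_left; intro p _
  simp only [Function.comp_apply]
  apply List.map_congr_left; intro k hk
  rw [List.mem_range] at hk
  simp only [Function.comp_apply]
  rcases le_or_gt 0 largeur with h | h
  · have hW : (((largeur - 0).toNat : Int)) = largeur := by omega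
    rw [hW]; ring
  · exfalso; omega
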